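-- pv_equiv track=rewrite | github.com/KoKwanwun/Algorithm | Level-1/최소직사각형.py | solution
-- ===== SOURCE A (Python) =====
-- def solution(sizes):
--     x = 0
--     y = 0
--     for data in sizes:
--         if data[0] > data[1]:
--             x = max(x, data[0])
--             y = max(y, data[1])
--         else:
--             x = max(x, data[1])
--             y = max(y, data[0])
--
--     return x*y
-- ===== SOURCE B (Python) =====
-- def solution(sizes):
--     longs = sorted([0] + [max(p[0], p[1]) for p in sizes])
--     shorts = sorted([0] + [min(p[0], p[1]) for p in sizes])
--     return longs[-1] * shorts[-1]
-- ===== Notes on version B (the rewrite author's own statement) =====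
-- stated objective: alternative
-- what changed: Replaces the single fused branchy max-accumulator loop by sort-then-take-last: build the lists of per-card long sides and short sides (each with a 0 baseline), sort them, and multiply the last elements; the running maxima disappear entirely.
import Mathlib
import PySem

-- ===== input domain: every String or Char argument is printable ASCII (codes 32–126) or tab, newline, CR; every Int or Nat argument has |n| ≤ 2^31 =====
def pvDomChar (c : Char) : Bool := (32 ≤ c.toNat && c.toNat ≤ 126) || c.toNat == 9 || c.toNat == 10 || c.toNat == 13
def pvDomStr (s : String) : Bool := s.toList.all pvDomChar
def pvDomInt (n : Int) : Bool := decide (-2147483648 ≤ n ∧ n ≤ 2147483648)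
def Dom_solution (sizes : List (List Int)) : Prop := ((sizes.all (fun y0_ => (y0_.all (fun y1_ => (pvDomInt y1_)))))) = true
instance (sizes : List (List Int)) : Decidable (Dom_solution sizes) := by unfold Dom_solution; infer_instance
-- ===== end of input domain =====

-- B replaces A's single fused branchy max-accumulator loop by sort-then-take-last: sort the
-- 0-seeded lists of per-card long sides and short sides and multiply the last elements; same
-- result, a different (O(n log n)) algorithm with no running maxima.


-- ===== PORT A =====
-- data[0]/data[1] via pyGet?; inside Pre_solution every card has ≥ 2 entries, so .getD 0 never fires.
def solution (sizes : List (List Int)) : Int :=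
  let st := sizes.foldl (fun (xy : Int × Int) data =>
    let d0 := (PySem.List.pyGet? data 0).getD 0
    let d1 := (PySem.List.pyGet? data 1).getD 0
    if d0 > d1 then (max xy.1 d0, max xy.2 d1) else (max xy.1 d1, max xy.2 d0)) (0, 0)
  st.1 * st.2

-- ===== PORT B =====
-- longs = sorted([0] + [max(p[0],p[1]) for p in sizes]); shorts likewise with min;
-- return longs[-1] * shorts[-1]  (the [-1] is pyGet?; the lists are nonempty, so getD 0 never fires).
def solution_alt (sizes : List (List Int)) : Int :=
  let longs := PySem.List.sorted ((0 : Int) :: sizes.map (fun p =>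
      max ((PySem.List.pyGet? p 0).getD 0) ((PySem.List.pyGet? p 1).getD 0))) (fun y => y) false
  let shorts := PySem.List.sorted ((0 : Int) :: sizes.map (fun p =>
      min ((PySem.List.pyGet? p 0).getD 0) ((PySem.List.pyGet? p 1).getD 0))) (fun y => y) false
  ((PySem.List.pyGet? longs (-1)).getD 0) * ((PySem.List.pyGet? shorts (-1)).getD 0)

-- ===== PRECONDITION & SPEC =====
-- A raises IndexError on any card with fewer than 2 entries; exactly those inputs are excluded.
def Pre_solution (sizes : List (List Int)) : Prop := ∀ p ∈ sizes, 2 ≤ p.length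
instance (sizes : List (List Int)) : Decidable (Pre_solution sizes) := by unfold Pre_solution; infer_instance
def pvWitness_solution : List (List Int) := [[3, 7], [5, 2]]
def Spec_solution (sizes : List (List Int)) (out : Int) : Prop := out = solution_alt sizes
instance (sizes : List (List Int)) (out : Int) : Decidable (Spec_solution sizes out) := by unfold Spec_solution; infer_instance

-- ===== CLAIM (what is proved, stated in full; the proofs are below) =====
def Claim_equal_solution : Prop := ∀ (sizes : List (List Int)), Dom_solution sizes → Pre_solution sizes → Spec_solution sizes (solution sizes)

-- ===== LEMMAS AND PROOFS =====
theorem solution_foldl_split (sizes : List (List Int)) (x y : Int) :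
    sizes.foldl (fun (xy : Int × Int) data =>
      let d0 := (PySem.List.pyGet? data 0).getD 0
      let d1 := (PySem.List.pyGet? data 1).getD 0
      if d0 > d1 then (max xy.1 d0, max xy.2 d1) else (max xy.1 d1, max xy.2 d0)) (x, y)
    = ((sizes.map (fun p => max ((PySem.List.pyGet? p 0).getD 0) ((PySem.List.pyGet? p 1).getD 0))).foldl max x,
       (sizes.map (fun p => min ((PySem.List.pyGet? p 0).getD 0) ((PySem.List.pyGet? p 1).getD 0))).foldl max y) := by
  induction sizes generalizing x y with
  | nil => rfl
  | cons p t ih =>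
      simp only [List.foldl_cons, List.map_cons]
      rw [← ih]
      congr 1
      split_ifs with h
      · congr 1 <;> omega
      · congr 1 <;> omega

theorem foldl_max_mem (L : List Int) (a : Int) : L.foldl max a ∈ a :: L := by
  induction L generalizing a with
  | nil => simp
  | cons b t ih =>
      simp only [List.foldl_cons]
      have h := ih (max a b)
      rcases List.mem_cons.mp h with h | h
      · rw [h]; rcases max_choice a b with hc | hc <;> simp [hc]
      · simp [h]

theorem foldl_max_ub (L : List Int) (a : Int) : ∀ y ∈ a :: L, y ≤ L.foldl max a := by
  induction L generalizing a with
  | nil => intro y hy; simp at hy; simp [hy]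
  | cons b t ih =>
      intro y hy
      simp only [List.foldl_cons]
      rcases List.mem_cons.mp hy with h | h
      · rw [h]; exact le_trans (le_max_left a b) (ih (max a b) _ List.mem_cons_self)
      · rcases List.mem_cons.mp h with h' | h'
        · rw [h']; exact le_trans (le_max_right a b) (ih (max a b) _ List.mem_cons_self)
        · exact ih (max a b) y (List.mem_cons_of_mem _ h')

-- last element of sorted([0] + L) is foldl max 0 L
theorem last_sorted_seed0 (L : List Int) :
    PySem.List.pyGet? (PySem.List.sorted ((0 : Int) :: L) (fun y => y) false) (-1)
      = some (L.foldl max 0) := by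
  set s := PySem.List.sorted ((0 : Int) :: L) (fun y => y) false with hs
  have hperm : s.Perm ((0 : Int) :: L) := PySem.List.sorted_perm _ _ _
  have hlen : s.length = L.length + 1 := by simpa using hperm.length_eq
  have hpos : 0 < s.length := by omega
  have hmemlast : s[s.length - 1] ∈ s := List.getElem_mem _
  have hub : ∀ y ∈ s, y ≤ s[s.length - 1] := by
    intro y hy
    rcases List.mem_iff_getElem.mp hy with ⟨j, hj, rfl⟩
    have := PySem.List.key_sorted_getElem_mono (xs := (0 : Int) :: L) (key := fun y => y)
      (p := j) (q := s.length - 1) (by omega) (by rw [← hs]; omega)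
    simpa [← hs] using this
  have heq : s[s.length - 1] = L.foldl max 0 := by
    apply le_antisymm
    · exact foldl_max_ub L 0 _ (hperm.mem_iff.mp hmemlast)
    · exact hub _ (hperm.mem_iff.mpr (foldl_max_mem L 0))
  rw [PySem.List.pyGet?_neg_one, List.getLast?_eq_getElem?, List.getElem?_eq_getElem (by omega)]
  simp [heq]

-- ===== VERDICT (by name: the statement is the Claim_ definition above) =====
theorem solution_spec : Claim_equal_solution := by
  intro sizes _ _
  unfold Spec_solution solution solution_alt
  simp only [solution_foldl_split, last_sorted_seed0, Option.getD_some]
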